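-- pv_equiv track=rewrite | github.com/Magiczne/AdventOfCode | 2017/d11/main.py | part1
-- ===== SOURCE A (Python) =====
-- def part1(data: list[str]) -> int:
--     x = 0
--     y = 0
--
--     for d in data:
--         if d == "n":
--             y += 1
--         elif d == "nw":
--             x -= 1
--             y += 1
--         elif d == "ne":
--             x += 1
--         elif d == "s":
--             y -= 1
--         elif d == "sw":
--             x -= 1
--         elif d == "se":
--             x += 1
--             y -= 1
--
--     return x + y
-- ===== SOURCE B (Python) =====
-- from collections import Counter
--
-- def part1(data: list[str]) -> int:
--     c = Counter(data)
--     return c["n"] + c["ne"] - c["s"] - c["sw"]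
-- ===== Notes on version B (the rewrite author's own statement) =====
-- stated objective: simpler
-- what changed: Replaced the per-element branch-and-accumulate loop over x and y by a Counter frequency table combined in closed form (n and ne contribute +1 to x+y, s and sw -1, nw and se cancel).
import Mathlib
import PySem

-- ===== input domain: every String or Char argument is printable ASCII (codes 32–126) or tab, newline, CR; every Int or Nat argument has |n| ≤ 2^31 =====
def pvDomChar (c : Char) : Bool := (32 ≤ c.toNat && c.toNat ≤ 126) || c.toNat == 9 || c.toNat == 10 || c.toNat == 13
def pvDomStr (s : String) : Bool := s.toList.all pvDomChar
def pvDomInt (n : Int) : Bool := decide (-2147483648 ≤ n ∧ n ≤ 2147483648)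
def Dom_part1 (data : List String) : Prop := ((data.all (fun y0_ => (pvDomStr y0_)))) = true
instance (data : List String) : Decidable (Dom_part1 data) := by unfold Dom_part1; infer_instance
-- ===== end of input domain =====

-- B replaces A's branch-and-accumulate loop by a frequency count combined in closed form (simpler; same O(n) cost).

-- ===== PORT A =====
-- one loop iteration of A: update (x, y) according to the direction string
def part1Step (p : Int × Int) (d : String) : Int × Int :=
  if d == "n" then (p.1, p.2 + 1)
  else if d == "nw" then (p.1 - 1, p.2 + 1)
  else if d == "ne" then (p.1 + 1, p.2)
  else if d == "s" then (p.1, p.2 - 1)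
  else if d == "sw" then (p.1 - 1, p.2)
  else if d == "se" then (p.1 + 1, p.2 - 1)
  else p

def part1 (data : List String) : Int :=
  let p := data.foldl part1Step (0, 0)
  p.1 + p.2

-- ===== PORT B =====
-- Counter(data)[k] is the multiplicity of k in data, ported as List.count
def part1_alt (data : List String) : Int :=
  (data.count "n" : Int) + (data.count "ne" : Int)
    - (data.count "s" : Int) - (data.count "sw" : Int)

-- ===== PRECONDITION & SPEC =====
def Spec_part1 (data : List String) (out : Int) : Prop := out = part1_alt data
instance (data : List String) (out : Int) : Decidable (Spec_part1 data out) := by unfold Spec_part1; infer_instance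

-- ===== CLAIM (what is proved, stated in full; the proofs are below) =====
def Claim_equal_part1 : Prop := ∀ (data : List String), Dom_part1 data → Spec_part1 data (part1 data)

-- ===== LEMMAS AND PROOFS =====
theorem part1_fold_eq (data : List String) : ∀ (x y : Int),
    (data.foldl part1Step (x, y)).1 + (data.foldl part1Step (x, y)).2 = x + y + part1_alt data := by
  induction data with
  | nil => intro x y; simp [part1_alt]
  | cons d t ih =>
    intro x y
    simp only [List.foldl_cons, part1Step, part1_alt, List.count_cons]
    split_ifs with h1 h2 h3 h4 h5 h6 <;>
      simp_all [ih, part1_alt, List.count_cons, beq_iff_eq] <;> push_cast <;> ring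

-- ===== VERDICT (by name: the statement is the Claim_ definition above) =====
theorem part1_spec : Claim_equal_part1 := by
  intro data _
  show part1 data = part1_alt data
  simpa using part1_fold_eq data 0 0
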